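-- pv_equiv track=rewrite | github.com/junohkwon/Python | ch14-B.More_Programming_Practice_2.py | sort_repeated
-- ===== SOURCE A (Python) =====
-- def sort_repeated(L):
--     seen = set()
--     seenAgain = set()
--     for element in L:
--         if element in seen:
--             seenAgain.add(element)
--         seen.add(element)
--     return sorted(seenAgain)
-- ===== SOURCE B (Python) =====
-- def sort_repeated(L):
--     # Sort first, then one linear scan over adjacent pairs of the sorted list:
--     # an element is a duplicate iff it equals its predecessor; emit it only
--     # once per run (skip if it is already the last emitted value).
--     out = []
--     prev = None
--     for x in sorted(L):
--         if x == prev and (not out or out[-1] != x):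
--             out.append(x)
--         prev = x
--     return out
-- ===== Notes on version B (the rewrite author's own statement) =====
-- stated objective: alternative
-- what changed: Sort-first adjacent scan instead of hash-set bookkeeping: B sorts L up front and then makes one pass over the sorted list comparing each element with its predecessor, emitting an element once per run of equal neighbours; no seen/seenAgain sets and no final sort of a collected set.
import Mathlib
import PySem

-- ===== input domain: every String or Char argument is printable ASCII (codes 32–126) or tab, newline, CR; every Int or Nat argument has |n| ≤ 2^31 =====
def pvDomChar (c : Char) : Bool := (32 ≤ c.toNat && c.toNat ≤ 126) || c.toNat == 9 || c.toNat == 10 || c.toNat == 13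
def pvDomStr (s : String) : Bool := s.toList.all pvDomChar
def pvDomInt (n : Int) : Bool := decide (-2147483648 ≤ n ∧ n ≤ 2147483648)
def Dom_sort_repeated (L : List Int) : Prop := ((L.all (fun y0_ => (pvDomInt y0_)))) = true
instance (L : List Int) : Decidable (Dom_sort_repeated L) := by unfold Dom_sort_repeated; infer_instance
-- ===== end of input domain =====

-- B sorts first and then makes one pass over adjacent pairs of the sorted list, emitting an
-- element once per run of equal neighbours — no sets and no final sort of a collected set; alternative.

-- ===== PORT A =====
def sort_repeated (L : List Int) : List Int :=
  let st := L.foldl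
    (fun (st : PySem.Set Int × PySem.Set Int) element =>
      let seenAgain := if PySem.Set.contains st.1 element then PySem.Set.add st.2 element else st.2
      (PySem.Set.add st.1 element, seenAgain))
    (PySem.Set.empty, PySem.Set.empty)
  PySem.List.sorted st.2 (fun x => x) false

-- ===== PORT B =====
-- loop body of Source B: compare x with the previous element of the sorted list; append x
-- once per run of equal neighbours (skip when it is already the last emitted value)
def pvStep (st : List Int × Option Int) (x : Int) : List Int × Option Int :=
  (if st.2 = some x ∧ (st.1 = [] ∨ PySem.List.pyGet? st.1 (-1) ≠ some x)
   then st.1 ++ [x] else st.1, some x)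

def sort_repeated_alt (L : List Int) : List Int :=
  ((PySem.List.sorted L (fun x => x) false).foldl pvStep ([], none)).1

-- ===== PRECONDITION & SPEC =====
def Spec_sort_repeated (L : List Int) (out : List Int) : Prop := out = sort_repeated_alt L
instance (L : List Int) (out : List Int) : Decidable (Spec_sort_repeated L out) := by unfold Spec_sort_repeated; infer_instance

-- ===== CLAIM =====
def Claim_equal_sort_repeated : Prop := ∀ (L : List Int), Dom_sort_repeated L → Spec_sort_repeated L (sort_repeated L)

-- ===== LEMMAS AND PROOFS =====

-- invariant of A's loop: seenAgain stays duplicate-free, and its members are exactly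
-- the old members, elements already seen that recur, and elements duplicated in the rest
theorem pv_loop_inv (L : List Int) (s sa : PySem.Set Int) (hnd : sa.Nodup) :
    (L.foldl
      (fun (st : PySem.Set Int × PySem.Set Int) element =>
        let seenAgain := if PySem.Set.contains st.1 element then PySem.Set.add st.2 element else st.2
        (PySem.Set.add st.1 element, seenAgain))
      (s, sa)).2.Nodup ∧
    ∀ x : Int,
      x ∈ (L.foldl
        (fun (st : PySem.Set Int × PySem.Set Int) element =>
          let seenAgain := if PySem.Set.contains st.1 element then PySem.Set.add st.2 element else st.2
          (PySem.Set.add st.1 element, seenAgain))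
        (s, sa)).2 ↔ x ∈ sa ∨ (x ∈ s ∧ x ∈ L) ∨ 2 ≤ L.count x := by
  induction L generalizing s sa with
  | nil => simpa using hnd
  | cons a rest ih =>
    simp only [List.foldl_cons]
    set sa' : PySem.Set Int :=
      if PySem.Set.contains s a then PySem.Set.add sa a else sa with hsa'
    have hnd' : sa'.Nodup := by
      rw [hsa']; split
      · apply PySem.Set.nodup_add; exact hnd
      · exact hnd
    obtain ⟨h1, h2⟩ := ih (PySem.Set.add s a) sa' hnd'
    refine ⟨h1, fun x => ?_⟩
    rw [h2 x]
    have hcontains : PySem.Set.contains s a = true ↔ a ∈ s := PySem.Set.contains_iff s a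
    have hmem_count : x ∈ rest ↔ 1 ≤ rest.count x := by
      rw [← List.count_pos_iff]; omega
    by_cases hxa : x = a
    · by_cases hs : a ∈ s
      · constructor
        · intro _
          exact Or.inr (Or.inl ⟨by rw [hxa]; exact hs, by rw [hxa]; exact List.mem_cons_self⟩)
        · intro _
          left
          rw [hsa', if_pos (hcontains.mpr hs), PySem.Set.mem_add]
          exact Or.inr hxa
      · have hsaeq : sa' = sa := by
          rw [hsa', if_neg (fun h => hs (hcontains.mp h))]
        have hcnt : (a :: rest).count x = rest.count x + 1 := by
          rw [List.count_cons]; simp [hxa]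
        rw [hsaeq, hcnt, PySem.Set.mem_add]
        constructor
        · rintro (h | ⟨(hxs | rfl), hr⟩ | hc)
          · exact Or.inl h
          · exact absurd (hxa ▸ hxs) hs
          · right; right; have := hmem_count.mp hr; omega
          · right; right; omega
        · rintro (h | ⟨hxs, _⟩ | hc)
          · exact Or.inl h
          · exact absurd (hxa ▸ hxs) hs
          · right; left
            exact ⟨Or.inr hxa, hmem_count.mpr (by omega)⟩
    · have e1 : x ∈ sa' ↔ x ∈ sa := by
        rw [hsa']; split
        · rw [PySem.Set.mem_add]; simp [hxa]
        · exact Iff.rfl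
      have e2 : x ∈ PySem.Set.add s a ↔ x ∈ s := by
        rw [PySem.Set.mem_add]; simp [hxa]
      have e3 : x ∈ a :: rest ↔ x ∈ rest := by
        simp [List.mem_cons, hxa]
      have e4 : (a :: rest).count x = rest.count x := by
        simp [Ne.symm hxa]
      rw [e1, e2, e3, e4]

-- in a strictly increasing list bounded above by x, x occurs iff it is the last element
theorem pv_mem_iff_last (out : List Int) (x : Int) (hpw : out.Pairwise (· < ·))
    (hub : ∀ y ∈ out, y ≤ x) : x ∈ out ↔ out.getLast? = some x := by
  induction out with
  | nil => simp
  | cons a t ih =>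
    cases t with
    | nil => simp [List.getLast?_singleton, eq_comm]
    | cons b t' =>
      have hpw' := (List.pairwise_cons.mp hpw).2
      have hab := (List.pairwise_cons.mp hpw).1
      rw [List.getLast?_cons_cons]
      by_cases hxa : x = a
      · -- impossible: a < b ≤ x = a
        exfalso
        have h1 : a < b := hab b List.mem_cons_self
        have h2 : b ≤ x := hub b (by simp)
        omega
      · have hstep : x ∈ a :: b :: t' ↔ x ∈ b :: t' := by
          simp [List.mem_cons, hxa]
        rw [hstep, ih hpw' (fun y hy => hub y (List.mem_cons_of_mem a hy))]

-- invariant of B's scan over the sorted remainder s with state (out, prev)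
theorem pv_alt_inv (s : List Int) (out : List Int) (prev : Option Int)
    (hs : s.Pairwise (· ≤ ·)) (hout : out.Pairwise (· < ·))
    (hub : ∀ y ∈ out, ∀ x ∈ s, y ≤ x)
    (hprev : ∀ p, prev = some p → (∀ x ∈ s, p ≤ x) ∧ (∀ y ∈ out, y ≤ p)) :
    (s.foldl pvStep (out, prev)).1.Pairwise (· < ·) ∧
    ∀ z, z ∈ (s.foldl pvStep (out, prev)).1 ↔
      z ∈ out ∨ (prev = some z ∧ z ∈ s ∧ z ∉ out) ∨ 2 ≤ s.count z := by
  induction s generalizing out prev with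
  | nil =>
    refine ⟨hout, fun z => ?_⟩
    simp
  | cons x rest ih =>
    have hx_rest : ∀ z ∈ rest, x ≤ z := (List.pairwise_cons.mp hs).1
    have hrest_pw : rest.Pairwise (· ≤ ·) := (List.pairwise_cons.mp hs).2
    have hub_x : ∀ y ∈ out, y ≤ x := fun y hy => hub y hy x List.mem_cons_self
    simp only [List.foldl_cons]
    by_cases hcond : prev = some x ∧ (out = [] ∨ PySem.List.pyGet? out (-1) ≠ some x)
    · -- append branch
      have hstep : pvStep (out, prev) x = (out ++ [x], some x) := by
        simp [pvStep, hcond]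
      rw [hstep]
      have hnotin : x ∉ out := by
        rw [pv_mem_iff_last out x hout hub_x]
        rcases hcond.2 with he | hl
        · simp [he]
        · rwa [PySem.List.pyGet?_neg_one] at hl
      have hout' : (out ++ [x]).Pairwise (· < ·) := by
        rw [List.pairwise_append]
        refine ⟨hout, List.pairwise_singleton _ _, ?_⟩
        intro y hy z hz
        rw [List.mem_singleton] at hz
        subst hz
        rcases lt_or_eq_of_le (hub_x y hy) with h | h
        · exact h
        · exact absurd (h ▸ hy) hnotin
      have hub' : ∀ y ∈ out ++ [x], ∀ z ∈ rest, y ≤ z := by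
        intro y hy z hz
        rw [List.mem_append, List.mem_singleton] at hy
        rcases hy with hy | rfl
        · exact hub y hy z (List.mem_cons_of_mem x hz)
        · exact hx_rest z hz
      have hprev' : ∀ p, (some x : Option Int) = some p →
          (∀ z ∈ rest, p ≤ z) ∧ (∀ y ∈ out ++ [x], y ≤ p) := by
        rintro p hp
        injection hp with hp; subst hp
        refine ⟨hx_rest, ?_⟩
        intro y hy
        rw [List.mem_append, List.mem_singleton] at hy
        rcases hy with hy | rfl
        · exact hub_x y hy
        · exact le_refl _
      obtain ⟨hpw, hmem⟩ := ih (out ++ [x]) (some x) hrest_pw hout' hub' hprev'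
      refine ⟨hpw, fun z => ?_⟩
      rw [hmem z]
      by_cases hzx : z = x
      · subst hzx
        simp only [List.mem_append, List.mem_singleton]
        constructor
        · intro _
          exact Or.inr (Or.inl ⟨hcond.1, List.mem_cons_self, hnotin⟩)
        · intro _
          exact Or.inl (Or.inr trivial)
      · have e1 : z ∈ out ++ [x] ↔ z ∈ out := by
          simp [List.mem_append, hzx]
        have hhx : ¬ x = z := fun e => hzx e.symm
        have e3 : (x :: rest).count z = rest.count z := by
          simp [hhx]
        rw [e1, e3]
        constructor
        · rintro (h | ⟨h, _⟩ | h)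
          · exact Or.inl h
          · exact absurd (Option.some.inj h).symm hzx
          · exact Or.inr (Or.inr h)
        · rintro (h | ⟨hp, hzs, hzo⟩ | h)
          · exact Or.inl h
          · rw [hcond.1] at hp
            exact absurd (Option.some.inj hp).symm hzx
          · exact Or.inr (Or.inr h)
    · -- skip branch
      have hstep : pvStep (out, prev) x = (out, some x) := by
        simp only [pvStep]
        rw [if_neg hcond]
      rw [hstep]
      have hprev' : ∀ p, (some x : Option Int) = some p →
          (∀ z ∈ rest, p ≤ z) ∧ (∀ y ∈ out, y ≤ p) := by
        rintro p hp
        injection hp with hp; subst hp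
        exact ⟨hx_rest, hub_x⟩
      have hub' : ∀ y ∈ out, ∀ z ∈ rest, y ≤ z :=
        fun y hy z hz => hub y hy z (List.mem_cons_of_mem x hz)
      obtain ⟨hpw, hmem⟩ := ih out (some x) hrest_pw hout hub' hprev'
      refine ⟨hpw, fun z => ?_⟩
      rw [hmem z]
      by_cases hzx : z = x
      · subst hzx
        have hc : (z :: rest).count z = rest.count z + 1 := by
          simp
        have hcases : prev ≠ some z ∨ z ∈ out := by
          by_cases hp : prev = some z
          · right
            rcases not_and_or.mp hcond with h | h
            · exact absurd hp h
            · rw [not_or] at h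
              have hlast := h.2
              rw [not_not, PySem.List.pyGet?_neg_one] at hlast
              rw [pv_mem_iff_last out z hout hub_x]
              exact hlast
          · exact Or.inl hp
        rw [hc]
        have hmem_count : z ∈ rest ↔ 1 ≤ rest.count z := by
          rw [← List.count_pos_iff]; omega
        rcases hcases with hp | hin
        · constructor
          · rintro (h | ⟨_, hzs, _⟩ | h)
            · exact Or.inl h
            · right; right
              have := hmem_count.mp hzs
              omega
            · right; right; omega
          · rintro (h | ⟨hpz, _, _⟩ | h)
            · exact Or.inl h
            · exact absurd hpz hp
            · by_cases hzo : z ∈ out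
              · exact Or.inl hzo
              · by_cases hzr : z ∈ rest
                · exact Or.inr (Or.inl ⟨rfl, hzr, hzo⟩)
                · have : rest.count z = 0 := List.count_eq_zero.mpr hzr
                  omega
        · exact ⟨fun _ => Or.inl hin, fun _ => Or.inl hin⟩
      · have hhx : ¬ x = z := fun e => hzx e.symm
        have e3 : (x :: rest).count z = rest.count z := by
          simp [hhx]
        have hns : ¬ (prev = some z ∧ z ∈ x :: rest ∧ z ∉ out) := by
          rintro ⟨hp, hm, -⟩
          have hzle := (hprev z hp).1 x List.mem_cons_self
          rcases List.mem_cons.mp hm with h | h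
          · exact hzx h
          · have := hx_rest z h
            exact hzx (by omega)
        have hns' : ¬ ((some x : Option Int) = some z ∧ z ∈ rest ∧ z ∉ out) := by
          rintro ⟨hp, -, -⟩
          exact hzx (Option.some.inj hp).symm
        rw [e3]
        constructor
        · rintro (h | h | h)
          exacts [Or.inl h, absurd h hns', Or.inr (Or.inr h)]
        · rintro (h | h | h)
          exacts [Or.inl h, absurd h hns, Or.inr (Or.inr h)]

-- two strictly increasing lists with the same members are equal
theorem pv_eq_of_pairwise_lt (l1 l2 : List Int)
    (h1 : l1.Pairwise (· < ·)) (h2 : l2.Pairwise (· < ·))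
    (hm : ∀ x, x ∈ l1 ↔ x ∈ l2) : l1 = l2 := by
  have hnd1 : l1.Nodup := h1.imp (fun h => ne_of_lt h)
  have hnd2 : l2.Nodup := h2.imp (fun h => ne_of_lt h)
  have hperm : l1.Perm l2 := (List.perm_ext_iff_of_nodup hnd1 hnd2).mpr hm
  exact List.Perm.eq_of_pairwise (fun a b _ _ hab hba => ((lt_asymm hab) hba).elim) h1 h2 hperm

theorem sort_repeated_spec : Claim_equal_sort_repeated := by
  intro L _
  unfold Spec_sort_repeated sort_repeated sort_repeated_alt
  obtain ⟨hnd, hmem⟩ := pv_loop_inv L PySem.Set.empty PySem.Set.empty List.nodup_nil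
  set sa := (L.foldl
    (fun (st : PySem.Set Int × PySem.Set Int) element =>
      let seenAgain := if PySem.Set.contains st.1 element then PySem.Set.add st.2 element else st.2
      (PySem.Set.add st.1 element, seenAgain))
    (PySem.Set.empty, PySem.Set.empty)).2 with hsa
  -- left side: strictly increasing, members = duplicates of L
  have hA_perm : (PySem.List.sorted sa (fun x => x) false).Perm sa := PySem.List.sorted_perm _ _ _
  have hA_le : (PySem.List.sorted sa (fun x => x) false).Pairwise (· ≤ ·) := by
    have := PySem.List.sorted_pairwise sa (fun x => x)
    simpa using this
  have hA_nd : (PySem.List.sorted sa (fun x => x) false).Nodup := hA_perm.nodup_iff.mpr hnd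
  have hA_lt : (PySem.List.sorted sa (fun x => x) false).Pairwise (· < ·) := by
    have := hA_le.and hA_nd
    exact this.imp (fun ⟨hle, hne⟩ => lt_of_le_of_ne hle hne)
  have hA_mem : ∀ x, x ∈ PySem.List.sorted sa (fun x => x) false ↔ 2 ≤ L.count x := by
    intro x
    rw [PySem.List.mem_sorted, hmem x]
    simp [PySem.Set.empty]
  -- right side: strictly increasing, members = duplicates of L
  have hB_le : (PySem.List.sorted L (fun x => x) false).Pairwise (· ≤ ·) := by
    have := PySem.List.sorted_pairwise L (fun x => x)
    simpa using this
  obtain ⟨hB_pw, hB_mem0⟩ := pv_alt_inv (PySem.List.sorted L (fun x => x) false) [] none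
    hB_le List.Pairwise.nil (by simp) (by simp)
  have hB_mem : ∀ x, x ∈ ((PySem.List.sorted L (fun x => x) false).foldl pvStep ([], none)).1 ↔
      2 ≤ L.count x := by
    intro x
    rw [hB_mem0 x, (PySem.List.sorted_perm L (fun x => x) false).count_eq]
    simp
  exact pv_eq_of_pairwise_lt _ _ hA_lt hB_pw (fun x => (hA_mem x).trans (hB_mem x).symm)
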